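-- pv_equiv track=rewrite | github.com/lohiya-saurabh/DSA | DSA-1/Math/luckyNumbers.py | solve
-- ===== SOURCE A (Python) =====
-- import math
--
-- def solve(A):
--     allPrimes = findAllPrimes(A)
--     primes = []
--     for i, val in enumerate(allPrimes):
--         if val:
--             primes.append(i + 1)
--     i, n = 0, len(primes)
--     countLuckyNumbers = 0
--     totalPrimesTillA = totalPrimesTill(A)
--     while i < n:
--         j = n - 1
--         while j > i:
--             currMul = primes[i]*primes[j]
--             if currMul <= A:
--                 # total primes)
--                 tmp = totalPrimesTillA[A//currMul]
--                 if tmp >= 2: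
--                     countLuckyNumbers += A//currMul - tmp + 2
--                 else:
--                     countLuckyNumbers += 1
--             j -= 1
--         i += 1
--     return countLuckyNumbers
--
-- def findAllPrimes(A):
--     sqrt_A = math.sqrt(A)
--     isPrime = [True for ele in range(A)]
--     isPrime[0] = False
--     for i in range(2, int(sqrt_A) + 1):
--         for j in range(2*i, A + 1, i):
--             isPrime[j - 1] = False
--     return isPrime
--
-- def totalPrimesTill(A):
--     sqrt_A = math.sqrt(A)
--     isPrime = [True for ele in range(A)]
--     isPrime[0] = False
--     for i in range(2, int(sqrt_A) + 1):
--         for j in range(2*i, A + 1, i):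
--             isPrime[j - 1] = False
--     total = 0
--     totalPrimes = []
--     for val in isPrime:
--         total += 1 if val else 0
--         totalPrimes.append(total)
--     return totalPrimes
-- ===== SOURCE B (Python) =====
-- import math
--
-- def solve(A):
--     # Count over integers m = 2..A directly: m contributes f(A//m) exactly when m
--     # is a product of two distinct primes (found by trial division by primes up to
--     # sqrt(m) plus one sieve lookup), instead of iterating over pairs of primes.
--     sieve = [True] * A
--     sieve[0] = False
--     for i in range(2, int(math.sqrt(A)) + 1):
--         for j in range(2 * i, A + 1, i):
--             sieve[j - 1] = False
--     prefix = []
--     total = 0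
--     for flag in sieve:
--         total += flag
--         prefix.append(total)
--     primes = [i + 1 for i, f in enumerate(sieve) if f]
--     count = 0
--     for m in range(2, A + 1):
--         p = 0
--         for d in primes:
--             if d * d > m:
--                 break
--             if m % d == 0:
--                 p = d
--                 break
--         if p == 0:
--             continue  # m is prime (or 1): not a semiprime
--         q = m // p
--         if q > p and sieve[q - 1]:
--             k = A // m
--             t = prefix[k]
--             count += (k - t + 2) if t >= 2 else 1
--     return count
-- ===== Notes on version B (the rewrite author's own statement) =====
-- stated objective: faster
-- what changed: B abandons A's double loop over prime-index pairs: it scans the integers m = 2..A once, recognises the semiprimes m = p*q (p<q both prime) by trial division with primes up to sqrt(m) plus one sieve lookup for q, and adds the same per-m contribution f(A//m); it also sieves once and builds the prefix prime counts from that single sieve.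
-- outside the precondition, e.g. on solve(0): A raises IndexError, B raises IndexError; on solve(-3): A raises ValueError, B raises IndexError
import Mathlib
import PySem

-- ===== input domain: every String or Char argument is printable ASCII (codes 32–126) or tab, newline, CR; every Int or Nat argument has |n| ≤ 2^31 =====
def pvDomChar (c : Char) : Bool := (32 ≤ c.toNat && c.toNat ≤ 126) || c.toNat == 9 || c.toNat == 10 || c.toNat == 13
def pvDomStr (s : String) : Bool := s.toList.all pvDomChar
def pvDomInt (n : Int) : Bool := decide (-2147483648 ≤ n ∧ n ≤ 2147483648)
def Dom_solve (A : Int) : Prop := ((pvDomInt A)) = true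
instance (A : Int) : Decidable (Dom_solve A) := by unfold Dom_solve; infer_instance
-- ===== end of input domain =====

-- B drops A's double loop over prime-index pairs: it scans the integers m = 2..A once and adds the
-- same per-m contribution exactly when m is a product of two distinct primes, recognised by trial
-- division with the primes up to sqrt(m) plus one sieve lookup (measured faster).

-- ===== PORT A =====
-- int(math.sqrt(A)) = Nat.sqrt A.toNat on the domain (|A| ≤ 2^31; A < 0 raises, outside Pre_).
-- Inside the sieve loops j ≥ 2*i ≥ 4, so (j-1).toNat is exact; list writes are in-range List.set.
def findAllPrimes (A : Int) : List Bool :=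
  let isPrime := (List.replicate A.toNat true).set 0 false
  (PySem.List.pyRange 2 ((A.toNat.sqrt : Int) + 1) 1).foldl
    (fun acc i =>
      (PySem.List.pyRange (2*i) (A+1) i).foldl
        (fun acc2 j => acc2.set (j-1).toNat false) acc)
    isPrime

def totalPrimesTill (A : Int) : List Int :=
  let isPrime := (List.replicate A.toNat true).set 0 false
  let sieved := (PySem.List.pyRange 2 ((A.toNat.sqrt : Int) + 1) 1).foldl
    (fun acc i =>
      (PySem.List.pyRange (2*i) (A+1) i).foldl
        (fun acc2 j => acc2.set (j-1).toNat false) acc)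
    isPrime
  (sieved.foldl (fun (st : Int × List Int) v =>
      let t := st.1 + (if v then (1:Int) else 0)
      (t, st.2 ++ [t])) ((0 : Int), ([] : List Int))).2

-- inner 'while j > i' of A; indices into primes/tp are in range whenever the branch fires
-- (primes[i]*primes[j] ≥ 6, so A // currMul ≤ A // 6 < A = tp.length), so getD is exact.
def loopJ (A : Int) (primes tp : List Int) (i j : Nat) (c : Int) : Int :=
  if i < j then
    let currMul := primes.getD i 0 * primes.getD j 0
    let c' := if currMul ≤ A then
        let k := PySem.Int.floordiv A currMul
        let tmp := tp.getD k.toNat 0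
        if 2 ≤ tmp then c + (k - tmp + 2) else c + 1
      else c
    loopJ A primes tp i (j-1) c'
  else c
termination_by j
decreasing_by omega

def loopI (A : Int) (primes tp : List Int) (n i : Nat) (c : Int) : Int :=
  if i < n then loopI A primes tp n (i+1) (loopJ A primes tp i (n-1) c) else c
termination_by n - i
decreasing_by omega

def solve (A : Int) : Int :=
  let allPrimes := findAllPrimes A
  let primes := (PySem.List.enumerate allPrimes 0).foldl
      (fun acc (p : Int × Bool) => if p.2 then acc ++ [p.1 + 1] else acc) ([] : List Int)
  let n := primes.length
  let tp := totalPrimesTill A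
  loopI A primes tp n 0 0

-- ===== PORT B =====
-- Source B's sieve loop is character-for-character the code of A's helper findAllPrimes (B just runs
-- it once), so its port reuses that definition instead of duplicating it.

-- 'total += flag; prefix.append(total)'
def prefixB (s : List Bool) : List Int :=
  (s.foldl (fun (st : Int × List Int) v =>
      let t := st.1 + (if v then (1:Int) else 0)
      (t, st.2 ++ [t])) ((0 : Int), ([] : List Int))).2

-- '[i + 1 for i, f in enumerate(sieve) if f]'
def primesB (s : List Bool) : List Int :=
  ((PySem.List.enumerate s 0).filter (fun p => p.2)).map (fun p => p.1 + 1)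

-- the inner 'for d in primes' loop with its two breaks; returns the sentinel 0 when no divisor is found
def trialDiv (m : Int) : List Int → Int
  | [] => 0
  | d :: rest =>
      if m < d * d then 0
      else if PySem.Int.mod m d = 0 then d
      else trialDiv m rest

def solve_alt (A : Int) : Int :=
  let s := findAllPrimes A
  let pre := prefixB s
  let primes := primesB s
  (PySem.List.pyRange 2 (A+1) 1).foldl
    (fun c m =>
      let p := trialDiv m primes
      if p = 0 then c
      else
        let q := PySem.Int.floordiv m p
        -- sieve[q-1]: whenever evaluated, 1 ≤ q ≤ m ≤ A, so the lookup is in range and getD is exact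
        if p < q ∧ s.getD (q-1).toNat false = true then
          let k := PySem.Int.floordiv A m
          let t := pre.getD k.toNat 0
          if 2 ≤ t then c + (k - t + 2) else c + 1
        else c) 0

-- ===== PRECONDITION & SPEC =====
-- A raises on every A ≤ 0 (ValueError from math.sqrt for A < 0, IndexError on the empty sieve for A = 0).
def Pre_solve (A : Int) : Prop := 1 ≤ A
instance (A : Int) : Decidable (Pre_solve A) := by unfold Pre_solve; infer_instance
def pvWitness_solve : Int := 30

def Spec_solve (A : Int) (out : Int) : Prop := out = solve_alt A
instance (A : Int) (out : Int) : Decidable (Spec_solve A out) := by unfold Spec_solve; infer_instance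

-- ===== CLAIM (what is proved, stated in full; the proofs are below) =====
def Claim_equal_solve : Prop := ∀ (A : Int), Dom_solve A → Pre_solve A → Spec_solve A (solve A)

-- ===== LEMMAS AND PROOFS =====

-- the contribution that both programs add for a value m = product of a prime pair
def fTerm (A : Int) (pre : List Int) (m : Int) : Int :=
  let k := PySem.Int.floordiv A m
  let t := pre.getD k.toNat 0
  if 2 ≤ t then k - t + 2 else 1

-- contribution of the pair (p, primes[jj]) as A counts it
def gp (A p : Int) (primes pfx : List Int) (jj : Nat) : Int :=
  if p * primes.getD jj 0 ≤ A then fTerm A pfx (p * primes.getD jj 0) else 0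

-- the test B's loop body performs for a value m (an abbrev so decidability unfolds)
abbrev condB (s : List Bool) (P : List Int) (m : Int) : Prop :=
  trialDiv m P ≠ 0 ∧ trialDiv m P < PySem.Int.floordiv m (trialDiv m P) ∧
    s.getD ((PySem.Int.floordiv m (trialDiv m P)) - 1).toNat false = true

def tB (A : Int) (s : List Bool) (pre P : List Int) (m : Int) : Int :=
  if condB s P m then fTerm A pre m else 0

-- ---------- A's loops as a double sum ----------

lemma bodyA_eq_add_gp (A : Int) (primes tp : List Int) (i jj : Nat) (c : Int) :
    (if primes.getD i 0 * primes.getD jj 0 ≤ A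
     then if 2 ≤ tp.getD (PySem.Int.floordiv A (primes.getD i 0 * primes.getD jj 0)).toNat 0
          then c + (PySem.Int.floordiv A (primes.getD i 0 * primes.getD jj 0)
                    - tp.getD (PySem.Int.floordiv A (primes.getD i 0 * primes.getD jj 0)).toNat 0 + 2)
          else c + 1
     else c) = c + gp A (primes.getD i 0) primes tp jj := by
  simp only [gp, fTerm]
  split_ifs <;> ring

lemma loopJ_eq (A : Int) (primes tp : List Int) (i : Nat) :
    ∀ j c, loopJ A primes tp i j c
      = c + ∑ jj ∈ Finset.Ioc i j, gp A (primes.getD i 0) primes tp jj := by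
  intro j
  induction j with
  | zero =>
    intro c
    rw [loopJ, if_neg (by omega : ¬ i < 0), Finset.Ioc_eq_empty (by omega : ¬ i < 0)]
    simp
  | succ j ih =>
    intro c
    rw [loopJ]
    by_cases h : i < j + 1
    · rw [if_pos h]
      refine Eq.trans (congrArg (fun x => loopJ A primes tp i j x)
        (bodyA_eq_add_gp A primes tp i (j+1) c)) ?_
      beta_reduce
      rw [ih, Finset.sum_Ioc_succ_top (by omega : i ≤ j)]
      ring
    · rw [if_neg h, Finset.Ioc_eq_empty (by omega : ¬ i < j + 1)]
      simp

lemma loopI_eq (A : Int) (primes tp : List Int) (n : Nat) :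
    ∀ fuel i c, n - i ≤ fuel →
      loopI A primes tp n i c
        = c + ∑ ii ∈ Finset.Ico i n,
              ∑ jj ∈ Finset.Ioc ii (n-1), gp A (primes.getD ii 0) primes tp jj := by
  intro fuel
  induction fuel with
  | zero =>
    intro i c h
    rw [loopI, if_neg (by omega : ¬ i < n), Finset.Ico_eq_empty (by omega : ¬ i < n)]
    simp
  | succ fuel ih =>
    intro i c h
    rw [loopI]
    by_cases hin : i < n
    · rw [if_pos hin]
      rw [ih (i+1) _ (by omega), loopJ_eq]
      rw [Finset.sum_eq_sum_Ico_succ_bot hin]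
      ring
    · rw [if_neg hin, Finset.Ico_eq_empty (by omega : ¬ i < n)]
      simp

-- ---------- generic facts about the sieve fold ----------

lemma getD_set_false (acc : List Bool) (j k : Nat) :
    (acc.set j false).getD k false = (acc.getD k false && !(j == k)) := by
  rcases eq_or_ne j k with rfl | h
  · rcases Nat.lt_or_ge j acc.length with h1 | h1
    · simp [List.getD, List.getElem?_set, h1]
    · simp [List.getD, List.getElem?_set, Nat.not_lt.mpr h1, List.getElem?_eq_none h1]
  · simp [List.getD, List.getElem?_set, h]

lemma getD_foldl_set (l : List Int) :
    ∀ (acc : List Bool) (k : Nat),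
      (l.foldl (fun a j => a.set (j-1).toNat false) acc).getD k false
        = (acc.getD k false && !(l.any (fun j => (j-1).toNat == k))) := by
  induction l with
  | nil => simp
  | cons x xs ih =>
    intro acc k
    simp only [List.foldl_cons, List.any_cons]
    rw [ih, getD_set_false, Bool.not_or, Bool.and_assoc]

lemma getD_sieve_fold (l1 : List Int) (g : Int → List Int) :
    ∀ (acc : List Bool) (k : Nat),
      (l1.foldl (fun acc i => (g i).foldl (fun a j => a.set (j-1).toNat false) acc) acc).getD k false
        = (acc.getD k false && !(l1.any (fun i => (g i).any (fun j => (j-1).toNat == k)))) := by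
  induction l1 with
  | nil => simp
  | cons x xs ih =>
    intro acc k
    simp only [List.foldl_cons, List.any_cons]
    rw [ih, getD_foldl_set, Bool.not_or, Bool.and_assoc]

lemma length_foldl_set (l : List Int) :
    ∀ (acc : List Bool),
      (l.foldl (fun a j => a.set (j-1).toNat false) acc).length = acc.length := by
  induction l with
  | nil => simp
  | cons x xs ih => intro acc; rw [List.foldl_cons, ih, List.length_set]

lemma length_sieve_fold (l1 : List Int) (g : Int → List Int) :
    ∀ (acc : List Bool),
      (l1.foldl (fun acc i => (g i).foldl (fun a j => a.set (j-1).toNat false) acc) acc).length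
        = acc.length := by
  induction l1 with
  | nil => simp
  | cons x xs ih => intro acc; rw [List.foldl_cons, ih, length_foldl_set]

lemma length_findAllPrimes (A : Int) : (findAllPrimes A).length = A.toNat := by
  unfold findAllPrimes
  rw [length_sieve_fold]
  simp

-- ---------- sieve correctness ----------

lemma marked_iff (A : Int) (hA : 1 ≤ A) (k : Nat) (hk : k < A.toNat) (hk0 : 1 ≤ k) :
    ((PySem.List.pyRange 2 ((A.toNat.sqrt : Int) + 1) 1).any
      (fun i => (PySem.List.pyRange (2*i) (A+1) i).any (fun j => (j-1).toNat == k))) = true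
      ↔ ¬ Nat.Prime (k+1) := by
  rw [List.any_eq_true]
  constructor
  · rintro ⟨i, hi, hin⟩
    rw [List.any_eq_true] at hin
    obtain ⟨j, hj, hjk⟩ := hin
    rw [PySem.List.mem_pyRange_one] at hi
    rw [PySem.List.mem_pyRange_iff_of_pos (by omega : (0:Int) < i)] at hj
    have hjv : j = (k:Int) + 1 := by
      have : (j-1).toNat = k := by simpa using hjk
      omega
    have hdvd : i ∣ (k:Int) + 1 := by
      have h2i : i ∣ (2*i : Int) := ⟨2, by ring⟩
      have := dvd_add hj.2.2 h2i
      rwa [sub_add_cancel, hjv] at this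
    intro hp
    have hitn : i.toNat ∣ k + 1 := by
      have hi0 : (0:Int) ≤ i := by omega
      rw [← Int.toNat_of_nonneg hi0] at hdvd
      exact_mod_cast Int.natCast_dvd_natCast.mp (by exact_mod_cast hdvd)
    rcases hp.eq_one_or_self_of_dvd i.toNat hitn with h1 | h1 <;> omega
  · intro hp
    have hv2 : 2 ≤ k + 1 := by omega
    have hpf := Nat.minFac_prime (show k + 1 ≠ 1 by omega)
    have hsq : (k+1).minFac * (k+1).minFac ≤ k + 1 := by
      have := Nat.minFac_sq_le_self (show 0 < k + 1 by omega) hp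
      nlinarith [this]
    have hp2 : 2 ≤ (k+1).minFac := hpf.two_le
    have hpd : (k+1).minFac ∣ k + 1 := Nat.minFac_dvd (k+1)
    refine ⟨((k+1).minFac : Int), ?_, ?_⟩
    · rw [PySem.List.mem_pyRange_one]
      have h1 : (k+1).minFac ≤ Nat.sqrt (k+1) := Nat.le_sqrt.mpr hsq
      have h2 : Nat.sqrt (k+1) ≤ Nat.sqrt A.toNat := Nat.sqrt_le_sqrt (by omega)
      constructor
      · exact_mod_cast hp2
      · push_cast; omega
    · rw [List.any_eq_true]
      refine ⟨((k:Int) + 1), ?_, ?_⟩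
      · rw [PySem.List.mem_pyRange_iff_of_pos (by exact_mod_cast Nat.lt_of_lt_of_le Nat.zero_lt_two hp2)]
        refine ⟨?_, ?_, ?_⟩
        · have h2p : 2 * (k+1).minFac ≤ (k+1).minFac * (k+1).minFac :=
            Nat.mul_le_mul_right _ hp2
          push_cast; omega
        · have hA0 : (0:Int) ≤ A := by omega
          have : k + 1 ≤ A.toNat := by omega
          omega
        · refine dvd_sub (Int.natCast_dvd_natCast.mpr hpd) ⟨2, by ring⟩
      · have : (((k:Int) + 1) - 1).toNat = k := by omega
        simp [this]

lemma sieve_getD (A : Int) (hA : 1 ≤ A) (k : Nat) (hk : k < A.toNat) :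
    (findAllPrimes A).getD k false = decide (Nat.Prime (k+1)) := by
  unfold findAllPrimes
  rw [getD_sieve_fold, getD_set_false]
  have hbase : (List.replicate A.toNat true).getD k false = true := by
    simp [List.getD, List.getElem?_replicate, hk]
  rw [hbase, Bool.true_and]
  rcases Nat.eq_zero_or_pos k with rfl | hk1
  · simp [Nat.not_prime_one]
  · rw [show ((0:Nat) == k) = false by simp; omega]
    simp only [Bool.not_false, Bool.true_and]
    have hiff := marked_iff A hA k hk hk1
    set M := ((PySem.List.pyRange 2 ((A.toNat.sqrt : Int) + 1) 1).any
      (fun i => (PySem.List.pyRange (2*i) (A+1) i).any (fun j => (j-1).toNat == k))) with hMdef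
    cases hM : M with
    | false =>
      rw [hM] at hiff
      have : Nat.Prime (k+1) := by
        by_contra hnp
        exact Bool.false_ne_true (hiff.mpr hnp)
      simp [this]
    | true =>
      rw [hM] at hiff
      simp [hiff.mp rfl]

-- ---------- the primes list ----------

lemma primesA_eq (s : List Bool) :
    (PySem.List.enumerate s 0).foldl
        (fun acc (p : Int × Bool) => if p.2 then acc ++ [p.1 + 1] else acc) ([] : List Int)
      = primesB s := by
  have h := PySem.List.foldl_append_if (fun p : Int × Bool => p.2)
    (fun p : Int × Bool => p.1 + 1) (PySem.List.enumerate s 0) ([] : List Int)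
  simpa [primesB] using h

lemma primesB_sorted (s : List Bool) : (primesB s).Pairwise (· < ·) := by
  unfold primesB
  rw [List.pairwise_map]
  have h1 : ((PySem.List.enumerate s 0).filter (fun p => p.2)).Pairwise
      (fun p q : Int × Bool => p.1 < q.1) :=
    (PySem.List.pairwise_lt_enumerate s 0).filter _
  exact h1.imp (by intro a b h; omega)

lemma mem_primesB_iff (A : Int) (hA : 1 ≤ A) (x : Int) :
    x ∈ primesB (findAllPrimes A) ↔ 2 ≤ x ∧ x ≤ A ∧ Nat.Prime x.toNat := by
  unfold primesB
  simp only [List.mem_map, List.mem_filter]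
  constructor
  · rintro ⟨p, ⟨hmem, hflag⟩, rfl⟩
    rw [PySem.List.mem_enumerate_iff] at hmem
    obtain ⟨k, hklt, rfl⟩ := hmem
    have hkN : k < A.toNat := by rwa [length_findAllPrimes] at hklt
    have : (findAllPrimes A)[k] = decide (Nat.Prime (k+1)) := by
      rw [← List.getD_eq_getElem _ false hklt, sieve_getD A hA k hkN]
    rw [this] at hflag
    have hpk : Nat.Prime (k+1) := by simpa using hflag
    have h2 : 2 ≤ k + 1 := hpk.two_le
    refine ⟨by push_cast; omega, ?_, ?_⟩
    · have hA0 : (0:Int) ≤ A := by omega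
      push_cast; omega
    · have : ((0:Int) + k + 1).toNat = k + 1 := by omega
      rw [this]; exact hpk
  · rintro ⟨h2, hxA, hpr⟩
    have hA0 : (0:Int) ≤ A := by omega
    set k := x.toNat - 1 with hkdef
    have hkN : k < A.toNat := by omega
    have hklt : k < (findAllPrimes A).length := by rwa [length_findAllPrimes]
    refine ⟨((k:Int), (findAllPrimes A)[k]), ⟨?_, ?_⟩, ?_⟩
    · rw [PySem.List.mem_enumerate_iff]
      exact ⟨k, hklt, by simp⟩
    · have : (findAllPrimes A)[k] = decide (Nat.Prime (k+1)) := by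
        rw [← List.getD_eq_getElem _ false hklt, sieve_getD A hA k hkN]
      rw [this]
      have : k + 1 = x.toNat := by omega
      simp [this, hpr]
    · omega

-- ---------- trial division ----------

lemma trialDiv_spec {m x : Int} :
    ∀ {l : List Int}, trialDiv m l = x → x ≠ 0 → x ∈ l ∧ x ∣ m ∧ ¬ m < x * x := by
  intro l
  induction l with
  | nil => intro h hx; exact absurd h.symm hx
  | cons d rest ih =>
    intro h hx
    rw [trialDiv] at h
    split_ifs at h with h1 h2
    · exact absurd h.symm hx
    · subst h
      exact ⟨List.mem_cons_self, (PySem.Int.mod_eq_zero_iff_dvd m d).mp h2, h1⟩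
    · obtain ⟨ha, hb, hc⟩ := ih h hx
      exact ⟨List.mem_cons_of_mem _ ha, hb, hc⟩

lemma trialDiv_eq_of {m x : Int} :
    ∀ {l : List Int}, l.Pairwise (· < ·) → (∀ d ∈ l, (2:Int) ≤ d) → x ∈ l →
      ¬ m < x * x → x ∣ m → (∀ d ∈ l, d < x → ¬ d ∣ m) → trialDiv m l = x := by
  intro l
  induction l with
  | nil => intro _ _ hx; exact absurd hx (List.not_mem_nil)
  | cons d rest ih =>
    intro hsort hpos hx hsq hdvd hmin
    rw [List.pairwise_cons] at hsort
    rcases List.mem_cons.mp hx with rfl | hx'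
    · rw [trialDiv, if_neg hsq, if_pos ((PySem.Int.mod_eq_zero_iff_dvd m x).mpr hdvd)]
    · have hdx : d < x := hsort.1 x hx'
      have hd2 : (2:Int) ≤ d := hpos d List.mem_cons_self
      have hnd : ¬ d ∣ m := hmin d List.mem_cons_self hdx
      have hns : ¬ m < d * d := by nlinarith
      rw [trialDiv, if_neg hns,
        if_neg (fun hmod => hnd ((PySem.Int.mod_eq_zero_iff_dvd m d).mp hmod))]
      exact ih hsort.2 (fun e he => hpos e (List.mem_cons_of_mem _ he)) hx' hsq hdvd
        (fun e he => hmin e (List.mem_cons_of_mem _ he))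

-- ---------- the semiprime characterisation of B's test ----------

lemma minFac_semi {p q : Nat} (hp : p.Prime) (hq : q.Prime) (hpq : p < q) :
    (p * q).minFac = p := by
  have hle : (p * q).minFac ≤ p :=
    Nat.minFac_le_of_dvd hp.two_le ⟨q, rfl⟩
  have hne1 : p * q ≠ 1 := by
    have := hp.two_le; have := hq.two_le; nlinarith
  have hmfp := Nat.minFac_prime hne1
  have hdvd := Nat.minFac_dvd (p * q)
  rcases (Nat.Prime.dvd_mul hmfp).mp hdvd with h | h
  · exact (Nat.prime_dvd_prime_iff_eq hmfp hp).mp h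
  · have := (Nat.prime_dvd_prime_iff_eq hmfp hq).mp h
    omega
  
lemma condB_iff (A : Int) (hA : 1 ≤ A) (m : Int) (hm2 : 2 ≤ m) (hmA : m ≤ A) :
    condB (findAllPrimes A) (primesB (findAllPrimes A)) m ↔
      ∃ p q : Nat, p.Prime ∧ q.Prime ∧ p < q ∧ m.toNat = p * q := by
  have hA0 : (0:Int) ≤ A := by omega
  constructor
  · rintro ⟨hne, hlt, hs⟩
    obtain ⟨hmem, hdvd, hsq⟩ := trialDiv_spec rfl hne
    set x := trialDiv m (primesB (findAllPrimes A)) with hxdef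
    obtain ⟨hx2, hxA, hxpr⟩ := (mem_primesB_iff A hA x).mp hmem
    have hx0 : (0:Int) < x := by omega
    set q := PySem.Int.floordiv m x with hqdef
    have hq : q = m / x := PySem.Int.floordiv_eq_ediv_of_pos hx0
    have hmq : m = x * q := by rw [hq, Int.mul_ediv_cancel' hdvd]
    have hq1 : 1 ≤ q := by nlinarith
    have hqm : q < m := by nlinarith
    have hidx : ((q - 1).toNat) < A.toNat := by omega
    have hsv : (findAllPrimes A).getD (q-1).toNat false
        = decide (Nat.Prime ((q-1).toNat + 1)) := sieve_getD A hA _ hidx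
    rw [hsv] at hs
    have hqpr : Nat.Prime q.toNat := by
      have : (q-1).toNat + 1 = q.toNat := by omega
      rw [this] at hs
      simpa using hs
    refine ⟨x.toNat, q.toNat, hxpr, hqpr, by omega, ?_⟩
    have : ((x.toNat * q.toNat : Nat) : Int) = m := by
      push_cast [Int.toNat_of_nonneg (by omega : (0:Int) ≤ x),
        Int.toNat_of_nonneg (by omega : (0:Int) ≤ q)]
      omega
    omega
  · rintro ⟨p, q, hp, hq, hpq, hmpq⟩
    have hp2 := hp.two_le
    have hq2 := hq.two_le
    have hmv : m = (p : Int) * (q : Int) := by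
      have : ((p * q : Nat) : Int) = m := by
        rw [← hmpq, Int.toNat_of_nonneg (by omega)]
      push_cast at this
      omega
    have hmN : m.toNat ≤ A.toNat := by omega
    have hpP : (p : Int) ∈ primesB (findAllPrimes A) := by
      rw [mem_primesB_iff A hA]
      refine ⟨by exact_mod_cast hp2, ?_, by simpa using hp⟩
      have : p ≤ p * q := Nat.le_mul_of_pos_right p (by omega)
      have : p ≤ m.toNat := by omega
      omega
    have htd : trialDiv m (primesB (findAllPrimes A)) = (p : Int) := by
      apply trialDiv_eq_of (primesB_sorted _)
        (fun d hd => ((mem_primesB_iff A hA d).mp hd).1) hpP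
      · have : (p : Int) * (p : Int) ≤ m := by
          rw [hmv]
          have : p * p ≤ p * q := Nat.mul_le_mul_left p (by omega)
          exact_mod_cast this
        omega
      · exact ⟨(q : Int), hmv⟩
      · intro d hd hdp hddvd
        obtain ⟨hd2, hdA, hdpr⟩ := (mem_primesB_iff A hA d).mp hd
        have hdN : d.toNat ∣ m.toNat := by
          have hd0 : (0:Int) ≤ d := by omega
          rw [← Int.toNat_of_nonneg hd0, ← Int.toNat_of_nonneg (by omega : (0:Int) ≤ m)] at hddvd
          exact_mod_cast hddvd
        rw [hmpq] at hdN
        rcases (Nat.Prime.dvd_mul hdpr).mp hdN with h | h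
        · have := (Nat.prime_dvd_prime_iff_eq hdpr hp).mp h
          omega
        · have := (Nat.prime_dvd_prime_iff_eq hdpr hq).mp h
          omega
    have hfd : PySem.Int.floordiv m (p : Int) = (q : Int) := by
      rw [PySem.Int.floordiv_eq_ediv_of_pos (by exact_mod_cast Nat.lt_of_lt_of_le Nat.zero_lt_two hp2),
        hmv, Int.mul_ediv_cancel_left _ (by exact_mod_cast (by omega : p ≠ 0))]
    refine ⟨by rw [htd]; exact_mod_cast (by omega : p ≠ 0), ?_, ?_⟩
    · rw [htd, hfd]; exact_mod_cast hpq
    · rw [htd, hfd]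
      have hqm : (q : Int) < m := by
        rw [hmv]; nlinarith [hp2, hq2]
      have hidx : (((q : Int) - 1).toNat) < A.toNat := by omega
      rw [sieve_getD A hA _ hidx]
      have : ((q : Int) - 1).toNat + 1 = q := by omega
      rw [this]
      simp [hq]

-- ---------- B's loop as a sum ----------

lemma bodyB_eq_add_tB (A : Int) (s : List Bool) (pre P : List Int) (c m : Int) :
    (if trialDiv m P = 0 then c
     else
       if trialDiv m P < PySem.Int.floordiv m (trialDiv m P) ∧
           s.getD (PySem.Int.floordiv m (trialDiv m P) - 1).toNat false = true then
         if 2 ≤ pre.getD (PySem.Int.floordiv A m).toNat 0 then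
           c + (PySem.Int.floordiv A m - pre.getD (PySem.Int.floordiv A m).toNat 0 + 2)
         else c + 1
       else c) = c + tB A s pre P m := by
  simp only [tB, condB, fTerm]
  split_ifs <;> simp_all

lemma foldlB_eq (A : Int) (s : List Bool) (pre P : List Int) :
    ∀ (l : List Int) (c : Int),
      (l.foldl (fun c m =>
        if trialDiv m P = 0 then c
        else
          if trialDiv m P < PySem.Int.floordiv m (trialDiv m P) ∧
              s.getD (PySem.Int.floordiv m (trialDiv m P) - 1).toNat false = true then
            if 2 ≤ pre.getD (PySem.Int.floordiv A m).toNat 0 then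
              c + (PySem.Int.floordiv A m - pre.getD (PySem.Int.floordiv A m).toNat 0 + 2)
            else c + 1
          else c) c)
      = c + (l.map (tB A s pre P)).sum := by
  intro l
  induction l with
  | nil => intro c; simp
  | cons x xs ih =>
    intro c
    simp only [List.foldl_cons, List.map_cons, List.sum_cons]
    rw [ih, bodyB_eq_add_tB]
    ring

lemma solve_alt_eq_sum (A : Int) :
    solve_alt A = ((PySem.List.pyRange 2 (A+1) 1).map
      (tB A (findAllPrimes A) (prefixB (findAllPrimes A)) (primesB (findAllPrimes A)))).sum := by
  simp only [solve_alt]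
  rw [foldlB_eq A (findAllPrimes A) (prefixB (findAllPrimes A)) (primesB (findAllPrimes A))
    (PySem.List.pyRange 2 (A+1) 1) 0, zero_add]

-- ---------- the two index sets and the bijection ----------

def PairSet (A : Int) (P : List Int) : Finset (Nat × Nat) :=
  (Finset.range P.length ×ˢ Finset.range P.length).filter
    (fun a => a.1 < a.2 ∧ P.getD a.1 0 * P.getD a.2 0 ≤ A)

def SemiSet (A : Int) : Finset Nat :=
  (Finset.range (A-1).toNat).filter
    (fun k => condB (findAllPrimes A) (primesB (findAllPrimes A)) (2 + (k:Int)))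

lemma getD_strictMono {P : List Int} (hs : P.Pairwise (· < ·)) {a b : Nat}
    (ha : a < P.length) (hb : b < P.length) (hab : a < b) :
    P.getD a 0 < P.getD b 0 := by
  rw [List.getD_eq_getElem _ _ ha, List.getD_eq_getElem _ _ hb]
  exact List.pairwise_iff_getElem.mp hs a b ha hb hab

lemma pair_sum_eq_semi_sum (A : Int) (hA : 1 ≤ A) (pre : List Int) :
    ∑ a ∈ PairSet A (primesB (findAllPrimes A)),
        fTerm A pre (((primesB (findAllPrimes A)).getD a.1 0) * ((primesB (findAllPrimes A)).getD a.2 0))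
      = ∑ k ∈ SemiSet A, fTerm A pre (2 + (k:Int)) := by
  have hsort := primesB_sorted (findAllPrimes A)
  set P := primesB (findAllPrimes A) with hPdef
  have hmemP : ∀ {i : Nat}, i < P.length →
      2 ≤ P.getD i 0 ∧ P.getD i 0 ≤ A ∧ Nat.Prime (P.getD i 0).toNat := by
    intro i hi
    have hm : P.getD i 0 ∈ P := by
      rw [List.getD_eq_getElem _ _ hi]; exact List.getElem_mem hi
    rw [hPdef] at hm
    exact (mem_primesB_iff A hA _).mp hm
  have idx_eq : ∀ {a b : Nat}, a < P.length → b < P.length → P.getD a 0 = P.getD b 0 → a = b := by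
    intro a b haL hbL hab
    rcases Nat.lt_trichotomy a b with h | h | h
    · have := getD_strictMono hsort haL hbL h; omega
    · exact h
    · have := getD_strictMono hsort hbL haL h; omega
  refine Finset.sum_bij (fun a _ => ((P.getD a.1 0) * (P.getD a.2 0) - 2).toNat) ?_ ?_ ?_ ?_
  · -- maps into SemiSet
    rintro ⟨i, j⟩ ha
    dsimp only
    simp only [PairSet, Finset.mem_filter, Finset.mem_product, Finset.mem_range] at ha
    obtain ⟨⟨hi, hj⟩, hij, hle⟩ := ha
    obtain ⟨hpi2, hpiA, hpi⟩ := hmemP hi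
    obtain ⟨hpj2, hpjA, hpj⟩ := hmemP hj
    have hprod2 : (2:Int) ≤ P.getD i 0 * P.getD j 0 := by nlinarith
    simp only [SemiSet, Finset.mem_filter, Finset.mem_range]
    refine ⟨by omega, ?_⟩
    have hrw : 2 + (((P.getD i 0) * (P.getD j 0) - 2).toNat : Int) = P.getD i 0 * P.getD j 0 := by
      omega
    rw [hrw, condB_iff A hA _ hprod2 hle]
    refine ⟨(P.getD i 0).toNat, (P.getD j 0).toNat, hpi, hpj,
      by have := getD_strictMono hsort hi hj hij; omega, ?_⟩
    have hcast : (((P.getD i 0).toNat * (P.getD j 0).toNat : Nat) : Int)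
        = P.getD i 0 * P.getD j 0 := by
      rw [Nat.cast_mul, Int.toNat_of_nonneg (by omega : (0:Int) ≤ P.getD i 0),
        Int.toNat_of_nonneg (by omega : (0:Int) ≤ P.getD j 0)]
    omega
  · -- injective
    rintro ⟨i, j⟩ ha ⟨i', j'⟩ ha' heq
    dsimp only at heq
    simp only [PairSet, Finset.mem_filter, Finset.mem_product, Finset.mem_range] at ha ha'
    obtain ⟨⟨hi, hj⟩, hij, _⟩ := ha
    obtain ⟨⟨hi', hj'⟩, hij', _⟩ := ha'
    obtain ⟨hpi2, _, hpi⟩ := hmemP hi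
    obtain ⟨hpj2, _, hpj⟩ := hmemP hj
    obtain ⟨hpi2', _, hpi'⟩ := hmemP hi'
    obtain ⟨hpj2', _, hpj'⟩ := hmemP hj'
    have h1 := getD_strictMono hsort hi hj hij
    have h2 := getD_strictMono hsort hi' hj' hij'
    have hprod : P.getD i 0 * P.getD j 0 = P.getD i' 0 * P.getD j' 0 := by
      have e1 : (2:Int) ≤ P.getD i 0 * P.getD j 0 := by nlinarith
      have e2 : (2:Int) ≤ P.getD i' 0 * P.getD j' 0 := by nlinarith
      omega
    have hN : (P.getD i 0).toNat * (P.getD j 0).toNat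
        = (P.getD i' 0).toNat * (P.getD j' 0).toNat := by
      have hcast : (((P.getD i 0).toNat * (P.getD j 0).toNat : Nat) : Int)
          = (((P.getD i' 0).toNat * (P.getD j' 0).toNat : Nat) : Int) := by
        rw [Nat.cast_mul, Nat.cast_mul,
          Int.toNat_of_nonneg (by omega : (0:Int) ≤ P.getD i 0),
          Int.toNat_of_nonneg (by omega : (0:Int) ≤ P.getD j 0),
          Int.toNat_of_nonneg (by omega : (0:Int) ≤ P.getD i' 0),
          Int.toNat_of_nonneg (by omega : (0:Int) ≤ P.getD j' 0)]
        exact hprod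
      exact_mod_cast hcast
    have hmf1 := minFac_semi hpi hpj (by omega)
    have hmf2 := minFac_semi hpi' hpj' (by omega)
    have hpp : (P.getD i 0).toNat = (P.getD i' 0).toNat := by rw [← hmf1, ← hmf2, hN]
    have hqq : (P.getD j 0).toNat = (P.getD j' 0).toNat := by
      rw [hpp] at hN
      exact Nat.eq_of_mul_eq_mul_left (by omega) hN
    have hvi : P.getD i 0 = P.getD i' 0 := by
      rw [← Int.toNat_of_nonneg (by omega : (0:Int) ≤ P.getD i 0),
        ← Int.toNat_of_nonneg (by omega : (0:Int) ≤ P.getD i' 0), hpp]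
    have hvj : P.getD j 0 = P.getD j' 0 := by
      rw [← Int.toNat_of_nonneg (by omega : (0:Int) ≤ P.getD j 0),
        ← Int.toNat_of_nonneg (by omega : (0:Int) ≤ P.getD j' 0), hqq]
    exact Prod.ext (idx_eq hi hi' hvi) (idx_eq hj hj' hvj)
  · -- surjective
    intro k hk
    simp only [SemiSet, Finset.mem_filter, Finset.mem_range] at hk
    obtain ⟨hkr, hcond⟩ := hk
    have hm2 : (2:Int) ≤ 2 + (k:Int) := by omega
    have hmA : 2 + (k:Int) ≤ A := by omega
    obtain ⟨p, q, hp, hq, hpq, hmpq⟩ := (condB_iff A hA _ hm2 hmA).mp hcond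
    have hp2 := hp.two_le
    have hq2 := hq.two_le
    have hpm : p ≤ (2 + (k:Int)).toNat := by
      rw [hmpq]; exact Nat.le_mul_of_pos_right p (by omega)
    have hqm : q ≤ (2 + (k:Int)).toNat := by
      rw [hmpq]; exact Nat.le_mul_of_pos_left q (by omega)
    have hmv : (2 + (k:Int)) = (p : Int) * (q : Int) := by
      have : (((p * q : Nat)) : Int) = 2 + (k:Int) := by
        rw [← hmpq, Int.toNat_of_nonneg (by omega)]
      push_cast at this; omega
    have hpP : (p : Int) ∈ P := by
      rw [hPdef, mem_primesB_iff A hA]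
      refine ⟨by exact_mod_cast hp2, by omega, by simpa using hp⟩
    have hqP : (q : Int) ∈ P := by
      rw [hPdef, mem_primesB_iff A hA]
      refine ⟨by exact_mod_cast hq2, by omega, by simpa using hq⟩
    obtain ⟨i, hi, hiv⟩ := List.mem_iff_getElem.mp hpP
    obtain ⟨j, hj, hjv⟩ := List.mem_iff_getElem.mp hqP
    have hgi : P.getD i 0 = (p : Int) := by rw [List.getD_eq_getElem _ _ hi, hiv]
    have hgj : P.getD j 0 = (q : Int) := by rw [List.getD_eq_getElem _ _ hj, hjv]
    have hij : i < j := by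
      rcases Nat.lt_trichotomy i j with h | h | h
      · exact h
      · exfalso
        subst h
        rw [hgi] at hgj
        have : p = q := by exact_mod_cast hgj
        omega
      · exfalso
        have hlt := getD_strictMono hsort hj hi h
        rw [hgi, hgj] at hlt
        have : q < p := by exact_mod_cast hlt
        omega
    refine ⟨(i, j), ?_, ?_⟩
    · simp only [PairSet, Finset.mem_filter, Finset.mem_product, Finset.mem_range]
      exact ⟨⟨hi, hj⟩, hij, by rw [hgi, hgj, ← hmv]; exact hmA⟩
    · dsimp only
      rw [hgi, hgj, ← hmv]
      omega
  · -- values agree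
    rintro ⟨i, j⟩ ha
    dsimp only
    simp only [PairSet, Finset.mem_filter, Finset.mem_product, Finset.mem_range] at ha
    obtain ⟨⟨hi, hj⟩, hij, hle⟩ := ha
    obtain ⟨hpi2, _, _⟩ := hmemP hi
    obtain ⟨hpj2, _, _⟩ := hmemP hj
    have hprod2 : (2:Int) ≤ P.getD i 0 * P.getD j 0 := by nlinarith
    have hrw : 2 + (((P.getD i 0) * (P.getD j 0) - 2).toNat : Int) = P.getD i 0 * P.getD j 0 := by
      omega
    rw [hrw]

-- ---------- assembling the A-side ----------

lemma solveA_eq_pair_sum (A : Int) (hA : 1 ≤ A) :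
    solve A = ∑ a ∈ PairSet A (primesB (findAllPrimes A)),
        fTerm A (totalPrimesTill A)
          (((primesB (findAllPrimes A)).getD a.1 0) * ((primesB (findAllPrimes A)).getD a.2 0)) := by
  simp only [solve]
  rw [primesA_eq]
  set P := primesB (findAllPrimes A) with hPdef
  set tp := totalPrimesTill A with htp
  rw [loopI_eq A P tp P.length P.length 0 0 (by omega)]
  rw [zero_add]
  rw [PairSet, Finset.sum_filter,
    Finset.sum_product' (f := fun ii jj =>
      if ii < jj ∧ P.getD ii 0 * P.getD jj 0 ≤ A then fTerm A tp (P.getD ii 0 * P.getD jj 0) else 0)]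
  rw [← Finset.range_eq_Ico]
  apply Finset.sum_congr rfl
  intro ii hii
  rw [Finset.mem_range] at hii
  have hsplit : ∀ jj ∈ Finset.range P.length,
      (if ii < jj ∧ P.getD ii 0 * P.getD jj 0 ≤ A
       then fTerm A tp (P.getD ii 0 * P.getD jj 0) else 0)
        = (if ii < jj then gp A (P.getD ii 0) P tp jj else 0) := by
    intro jj _
    simp only [gp]
    split_ifs <;> first | rfl | tauto
  rw [Finset.sum_congr rfl hsplit, ← Finset.sum_filter]
  have hset : (Finset.range P.length).filter (fun jj => ii < jj) = Finset.Ioc ii (P.length - 1) := by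
    ext jj
    simp only [Finset.mem_filter, Finset.mem_range, Finset.mem_Ioc]
    omega
  rw [hset]

-- ---------- assembling the B-side ----------

lemma solveB_eq_semi_sum (A : Int) (hA : 1 ≤ A) :
    solve_alt A = ∑ k ∈ SemiSet A, fTerm A (totalPrimesTill A) (2 + (k:Int)) := by
  rw [solve_alt_eq_sum]
  have hpre : prefixB (findAllPrimes A) = totalPrimesTill A := rfl
  rw [hpre]
  rw [PySem.List.pyRange_one 2 (A+1)]
  rw [List.map_map]
  have hcast : ((A + 1 - 2 : Int)).toNat = (A - 1).toNat := by omega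
  rw [hcast]
  have hsum : ∀ (M : Nat) (h : Nat → Int), ((List.range M).map h).sum = ∑ k ∈ Finset.range M, h k :=
    fun M h => rfl
  rw [hsum]
  rw [SemiSet, Finset.sum_filter]
  apply Finset.sum_congr rfl
  intro k _
  simp only [Function.comp, tB]

-- ===== VERDICT (by name: the statement is the Claim_ definition above) =====
theorem solve_spec : Claim_equal_solve := by
  intro A _ hA
  unfold Spec_solve
  rw [solveA_eq_pair_sum A hA, solveB_eq_semi_sum A hA,
    pair_sum_eq_semi_sum A hA (totalPrimesTill A)]
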